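-- pv_equiv track=rewrite | github.com/ZzinB/Algorithm_Study | 프로그래머스/unrated/181858. 무작위로 K개의 수 뽑기/무작위로 K개의 수 뽑기.py | solution
-- ===== SOURCE A (Python) =====
-- def solution(arr, k):
--     answer = []
--     unique = set()
--     for num in arr:
--         if num not in unique:
--             answer.append(num)
--             unique.add(num)
--         if len(answer) == k:
--             break
--     while len(answer) < k:
--         answer.append(-1)
--     return answer
-- ===== SOURCE B (Python) =====
-- def solution(arr, k):
--     first = {}
--     for i, v in reversed(list(enumerate(arr))):
--         first[v] = i          # earlier indices overwrite later ones: first occurrence wins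
--     answer = [v for i, v in enumerate(arr) if first[v] == i][:k]
--     return answer + [-1] * (k - len(answer))
-- ===== Notes on version B (the rewrite author's own statement) =====
-- stated objective: alternative
-- what changed: B replaces A's single guarded accumulation (seen-set, per-element length check, early break, padding while-loop) by two index passes: a backward overwrite pass records each value's first-occurrence index in a dict, a forward pass keeps exactly the positions that equal their value's first index, then slices the first k and pads arithmetically.
-- intended difference: For k = 0 with a nonempty arr, A's break check never fires and it returns the whole deduplicated list, while B returns the intended empty list (picking 0 numbers yields []). — e.g. on solution([5], 0): A returns [5], B returns []
-- outside the precondition, e.g. on solution([1, 2, 3], -1): A returns [1, 2, 3], B returns [1, 2]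
import Mathlib
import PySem

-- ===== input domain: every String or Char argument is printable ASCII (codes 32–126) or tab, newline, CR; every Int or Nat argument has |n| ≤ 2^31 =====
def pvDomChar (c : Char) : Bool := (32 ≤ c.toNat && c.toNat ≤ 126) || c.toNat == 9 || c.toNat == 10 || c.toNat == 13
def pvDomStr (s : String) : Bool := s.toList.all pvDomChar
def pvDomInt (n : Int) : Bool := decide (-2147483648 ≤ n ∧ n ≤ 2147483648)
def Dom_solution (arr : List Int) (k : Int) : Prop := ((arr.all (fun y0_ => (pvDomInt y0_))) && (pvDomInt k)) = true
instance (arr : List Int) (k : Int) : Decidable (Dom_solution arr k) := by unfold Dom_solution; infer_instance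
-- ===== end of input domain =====

-- B replaces A's guarded accumulation (seen-set, length check, break, padding while-loop) by two
-- index passes: a backward overwrite pass recording first-occurrence indices in a dict, a forward
-- pass keeping positions equal to their value's first index, then slice and arithmetic padding.


-- ===== PORT A =====
-- the for-loop with break: state (answer, unique), returning early when len(answer) == k
def solutionLoop (arr : List Int) (answer : List Int) (unique : PySem.Set Int) (k : Int) : List Int :=
  match arr with
  | [] => answer
  | num :: rest =>
    let st := if PySem.Set.contains unique num then (answer, unique)
              else (answer ++ [num], PySem.Set.add unique num)
    if ((st.1.length : Int) = k) then st.1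
    else solutionLoop rest st.1 st.2 k

-- the while-loop: append -1 until len(answer) >= k
def solutionPad (answer : List Int) (k : Int) : List Int :=
  if (answer.length : Int) < k then solutionPad (answer ++ [-1]) k else answer
termination_by (k - answer.length).toNat
decreasing_by simp; omega

def solution (arr : List Int) (k : Int) : List Int :=
  solutionPad (solutionLoop arr [] PySem.Set.empty k) k

-- ===== PORT B =====
-- first = {}; for i, v in reversed(list(enumerate(arr))): first[v] = i
def bFirst (arr : List Int) : PySem.Dict Int Int :=
  (PySem.List.enumerate arr).reverse.foldl (fun d p => PySem.Dict.insert d p.2 p.1) PySem.Dict.empty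

def solution_alt (arr : List Int) (k : Int) : List Int :=
  let first := bFirst arr
  -- [v for i, v in enumerate(arr) if first[v] == i][:k]
  -- (first[v] == i with every v of arr a key of first: get? is some there, KeyError impossible)
  let answer := PySem.List.slice
      (((PySem.List.enumerate arr).filter
          (fun p => PySem.Dict.get? first p.2 == some p.1)).map (fun p => p.2))
      none (some k)
  answer ++ PySem.List.pyRepeat [-1] (k - answer.length)

-- ===== PRECONDITION & SPEC =====
-- Pre_ excludes negative k, where A's full-list result and B's negative-slice result are both
-- accidental corner values no caller would specify (k is a count of numbers to pick).
def Pre_solution (arr : List Int) (k : Int) : Prop := 0 ≤ k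
instance (arr : List Int) (k : Int) : Decidable (Pre_solution arr k) := by unfold Pre_solution; infer_instance
def pvWitness_solution : List Int × Int := ([1, 2, 2, 3], 3)

-- For k = 0 with nonempty arr, A's break check never fires and it returns the whole deduplicated
-- list, while B returns the intended empty list (picking 0 numbers yields []).
def D_solution (arr : List Int) (k : Int) : Prop := k = 0 ∧ arr ≠ []
instance (arr : List Int) (k : Int) : Decidable (D_solution arr k) := by unfold D_solution; infer_instance

def Spec_solution (arr : List Int) (k : Int) (out : List Int) : Prop :=
  ¬ D_solution arr k → out = solution_alt arr k
instance (arr : List Int) (k : Int) (out : List Int) : Decidable (Spec_solution arr k out) := by unfold Spec_solution; infer_instance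

def pvDiffWitness_solution : List Int × Int := ([5], 0)
def pvDiffWitnessOut_solution : (List Int) × (List Int) := ([5], [])

-- ===== CLAIM (what is proved, stated in full; the proofs are below) =====
def Claim_unchanged_solution : Prop := ∀ (arr : List Int) (k : Int), Dom_solution arr k → Pre_solution arr k → Spec_solution arr k (solution arr k)
def Claim_changed_solution : Prop := Dom_solution (pvDiffWitness_solution.1) (pvDiffWitness_solution.2) ∧ Pre_solution (pvDiffWitness_solution.1) (pvDiffWitness_solution.2) ∧ D_solution (pvDiffWitness_solution.1) (pvDiffWitness_solution.2) ∧ solution (pvDiffWitness_solution.1) (pvDiffWitness_solution.2) = pvDiffWitnessOut_solution.1 ∧ solution_alt (pvDiffWitness_solution.1) (pvDiffWitness_solution.2) = pvDiffWitnessOut_solution.2 ∧ pvDiffWitnessOut_solution.1 ≠ pvDiffWitnessOut_solution.2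
def Claim_exact_solution : Prop := ∀ (arr : List Int) (k : Int), Dom_solution arr k → Pre_solution arr k → D_solution arr k → solution arr k ≠ solution_alt arr k

-- ===== LEMMAS AND PROOFS =====

-- ordered dedup of arr relative to already-seen elements (the common characterisation)
def dedupRel : List Int → List Int → List Int
  | [], _ => []
  | n :: r, s => if n ∈ s then dedupRel r s else n :: dedupRel r (s ++ [n])

-- ---- A side ----

lemma loop_eq_take (k : Int) (arr : List Int) :
    ∀ answer : List Int, (answer.length : Int) < k →
      solutionLoop arr answer answer k = answer ++ (dedupRel arr answer).take (k.toNat - answer.length) := by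
  induction arr with
  | nil => intro answer _; simp [solutionLoop, dedupRel]
  | cons num rest ih =>
    intro answer hlt
    by_cases hmem : num ∈ answer
    · have hne : ¬ ((answer.length : Int) = k) := by omega
      simp [solutionLoop, PySem.Set.contains, hmem, hne, dedupRel, ih answer hlt]
    · by_cases heq : ((answer.length : Int) + 1 = k)
      · have h1 : k.toNat - answer.length = 1 := by omega
        simp [solutionLoop, PySem.Set.contains, hmem, heq, dedupRel, h1]
      · have hlt' : ((answer ++ [num]).length : Int) < k := by simp; omega
        have h2 : k.toNat - answer.length = (k.toNat - (answer.length + 1)) + 1 := by omega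
        simp [solutionLoop, PySem.Set.contains, hmem, heq, dedupRel,
              ih (answer ++ [num]) hlt', h2]

lemma loop_eq_all (k : Int) (hk : k ≤ 0) (arr : List Int) :
    ∀ answer : List Int, solutionLoop arr answer answer k = answer ++ dedupRel arr answer := by
  induction arr with
  | nil => intro answer; simp [solutionLoop, dedupRel]
  | cons num rest ih =>
    intro answer
    by_cases hmem : num ∈ answer
    · have hne : ¬ ((answer.length : Int) = k) := by
        have : answer ≠ [] := by rintro rfl; simp at hmem
        have : 0 < answer.length := List.length_pos_iff.mpr this
        omega
      simp [solutionLoop, PySem.Set.contains, hmem, hne, dedupRel, ih answer]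
    · have hne : ¬ ((answer.length : Int) + 1 = k) := by omega
      simp [solutionLoop, PySem.Set.contains, hmem, hne, dedupRel, ih (answer ++ [num])]

lemma pad_eq (answer : List Int) (k : Int) :
    solutionPad answer k = answer ++ List.replicate (k - answer.length).toNat (-1) := by
  fun_induction solutionPad answer k with
  | case1 answer h ih =>
    rw [ih]
    have : (k - (answer.length : Int)).toNat = (k - ((answer ++ [-1]).length : Int)).toNat + 1 := by
      simp; omega
    simp [this, List.replicate_succ]
  | case2 answer h =>
    have : (k - (answer.length : Int)).toNat = 0 := by omega
    simp [this]

-- ---- B side ----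

-- the backward overwrite loop: the FIRST pair of L with a given key wins
lemma foldl_reverse_insert_get? (L : List (Int × Int)) (d : PySem.Dict Int Int) (v : Int) :
    (L.reverse.foldl (fun d p => PySem.Dict.insert d p.2 p.1) d).get? v
      = match L.find? (fun p => p.2 == v) with
        | some p => some p.1
        | none => d.get? v := by
  induction L generalizing d with
  | nil => simp
  | cons p L ih =>
    rw [List.reverse_cons, List.foldl_append, List.foldl_cons, List.foldl_nil,
        PySem.Dict.get?_insert]
    by_cases h : p.2 = v
    · rw [List.find?_cons_of_pos (by simp [h]), if_pos h.symm]
    · rw [List.find?_cons_of_neg (by simp [h]), if_neg (fun hv => h hv.symm), ih]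

lemma mem_enumerate_bounds {xs : List Int} {p : Int × Int} (h : p ∈ PySem.List.enumerate xs) :
    0 ≤ p.1 ∧ p.1 < (xs.length : Int) ∧ p.2 ∈ xs := by
  rw [PySem.List.mem_enumerate_iff] at h
  obtain ⟨j, hj, rfl⟩ := h
  refine ⟨by simp, by simpa using hj, by simp⟩

-- values of arr are exactly the snd components of enumerate arr
lemma find?_enumerate_isSome {xs : List Int} {v : Int} (h : v ∈ xs) :
    ((PySem.List.enumerate xs).find? (fun p => p.2 == v)).isSome := by
  rw [List.find?_isSome]
  obtain ⟨j, hj, rfl⟩ := List.mem_iff_getElem.mp h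
  exact ⟨((j : Int), xs[j]), by rw [PySem.List.mem_enumerate_iff]; exact ⟨j, hj, by simp⟩, by simp⟩

lemma find?_enumerate_none {xs : List Int} {v : Int} (h : v ∉ xs) :
    (PySem.List.enumerate xs).find? (fun p => p.2 == v) = none := by
  rw [List.find?_eq_none]
  intro p hp
  have := (mem_enumerate_bounds hp).2.2
  simp only [beq_iff_eq]
  rintro rfl; exact h this

-- dedupRel over an appended last element
lemma dedupRel_append_singleton (xs : List Int) (x : Int) :
    ∀ s, dedupRel (xs ++ [x]) s = dedupRel xs s ++ (if x ∈ s ∨ x ∈ xs then [] else [x]) := by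
  induction xs with
  | nil => intro s; by_cases h : x ∈ s <;> simp [dedupRel, h]
  | cons n r ih =>
    intro s
    by_cases hn : n ∈ s
    · have hcond : (x ∈ s ∨ x ∈ n :: r) ↔ (x ∈ s ∨ x ∈ r) := by
        constructor
        · rintro (h | h)
          · exact Or.inl h
          · rcases List.mem_cons.mp h with rfl | h
            · exact Or.inl hn
            · exact Or.inr h
        · rintro (h | h)
          · exact Or.inl h
          · exact Or.inr (List.mem_cons_of_mem _ h)
      simp only [List.cons_append, dedupRel, if_pos hn, ih s]
      by_cases hx : x ∈ s ∨ x ∈ r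
      · rw [if_pos hx, if_pos (hcond.mpr hx)]
      · rw [if_neg hx, if_neg (fun h => hx (hcond.mp h))]
    · have hcond : (x ∈ s ++ [n] ∨ x ∈ r) ↔ (x ∈ s ∨ x ∈ n :: r) := by
        simp; tauto
      simp only [List.cons_append, dedupRel, if_neg hn, ih (s ++ [n])]
      by_cases hx : x ∈ s ++ [n] ∨ x ∈ r
      · rw [if_pos hx, if_pos (hcond.mp hx)]
      · rw [if_neg hx, if_neg (fun h => hx (hcond.mpr h))]

-- the forward pass selects exactly the first occurrences, in order
lemma filter_first_eq_dedupRel (arr : List Int) :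
    ((PySem.List.enumerate arr).filter
        (fun p => PySem.Dict.get? (bFirst arr) p.2 == some p.1)).map (fun p => p.2)
      = dedupRel arr [] := by
  induction arr using List.reverseRecOn with
  | nil => simp [PySem.List.enumerate, dedupRel]
  | append_singleton xs x ih =>
    have hen : PySem.List.enumerate (xs ++ [x])
        = PySem.List.enumerate xs ++ [((xs.length : Int), x)] := by
      simpa using PySem.List.enumerate_append xs [x] 0
    have hget : ∀ v, (PySem.Dict.get? (bFirst (xs ++ [x])) v)
        = match (PySem.List.enumerate (xs ++ [x])).find? (fun p => p.2 == v) with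
          | some p => some p.1
          | none => none := by
      intro v
      have h0 := foldl_reverse_insert_get? (PySem.List.enumerate (xs ++ [x])) PySem.Dict.empty v
      rw [PySem.Dict.get?_empty] at h0
      exact h0
    have hgetxs : ∀ v, (PySem.Dict.get? (bFirst xs) v)
        = match (PySem.List.enumerate xs).find? (fun p => p.2 == v) with
          | some p => some p.1
          | none => none := by
      intro v
      have h0 := foldl_reverse_insert_get? (PySem.List.enumerate xs) PySem.Dict.empty v
      rw [PySem.Dict.get?_empty] at h0
      exact h0
    -- condition agrees with the xs-condition on pairs of enumerate xs
    have hcongr : ∀ p ∈ PySem.List.enumerate xs,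
        (PySem.Dict.get? (bFirst (xs ++ [x])) p.2 == some p.1)
          = (PySem.Dict.get? (bFirst xs) p.2 == some p.1) := by
      intro p hp
      have hv : p.2 ∈ xs := (mem_enumerate_bounds hp).2.2
      have hsome := find?_enumerate_isSome hv
      rw [hget, hgetxs, hen, List.find?_append]
      obtain ⟨q, hq⟩ := Option.isSome_iff_exists.mp hsome
      rw [hq]; simp
    rw [hen, List.filter_append, List.filter_congr hcongr, List.map_append, ih,
        dedupRel_append_singleton xs x []]
    by_cases hx : x ∈ xs
    · -- the appended pair is filtered out: its value's first index is inside xs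
      obtain ⟨q, hq⟩ := Option.isSome_iff_exists.mp (find?_enumerate_isSome hx)
      have hqmem : q ∈ PySem.List.enumerate xs := List.mem_of_find?_eq_some hq
      have hqlt : q.1 < (xs.length : Int) := (mem_enumerate_bounds hqmem).2.1
      have hcond : (PySem.Dict.get? (bFirst (xs ++ [x])) x == some ((xs.length : Int))) = false := by
        rw [hget, hen, List.find?_append, hq]
        simp only [Option.some_or]
        simp [hqlt.ne]
      simp [hcond, hx]
    · have hcond : (PySem.Dict.get? (bFirst (xs ++ [x])) x == some ((xs.length : Int))) = true := by
        rw [hget, hen, List.find?_append, find?_enumerate_none hx]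
        simp
      simp [hcond, hx]

lemma alt_eq (arr : List Int) (k : Int) (hk : 0 ≤ k) :
    solution_alt arr k =
      (dedupRel arr []).take k.toNat ++
        List.replicate (k - (((dedupRel arr []).take k.toNat).length : Int)).toNat (-1) := by
  simp only [solution_alt, filter_first_eq_dedupRel, PySem.List.slice_to _ hk,
    PySem.List.pyRepeat_singleton]

lemma dedupRel_ne_nil (a : Int) (r : List Int) : dedupRel (a :: r) [] ≠ [] := by
  simp [dedupRel]

-- ===== VERDICT (by name: the statement is the Claim_ definition above) =====
theorem solution_spec : Claim_unchanged_solution := by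
  intro arr k _ hpre hnd
  unfold Pre_solution at hpre
  unfold D_solution at hnd
  by_cases hk : k = 0
  · have harr : arr = [] := by
      rcases arr with _ | ⟨a, r⟩
      · rfl
      · exact absurd ⟨hk, by simp⟩ hnd
    subst hk harr
    rw [solution, pad_eq]
    decide
  · have hk1 : (([] : List Int).length : Int) < k := by simp; omega
    have hloop : solutionLoop arr [] PySem.Set.empty k =
        (dedupRel arr []).take k.toNat := by
      simpa [PySem.Set.empty] using loop_eq_take k arr [] hk1
    rw [solution, hloop, pad_eq, alt_eq arr k (by omega)]

theorem solution_changed : Claim_changed_solution := by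
  unfold Claim_changed_solution
  have hA : solution pvDiffWitness_solution.1 pvDiffWitness_solution.2 = pvDiffWitnessOut_solution.1 := by
    rw [pvDiffWitness_solution, solution, pad_eq]; decide
  exact ⟨by decide, by decide, by decide, hA, by decide, by decide⟩

theorem solution_tight : Claim_exact_solution := by
  intro arr k _ _ hd
  obtain ⟨rfl, hne⟩ := hd
  rcases arr with _ | ⟨a, r⟩
  · exact absurd rfl hne
  · have hA : solution (a :: r) 0 = dedupRel (a :: r) [] := by
      have := loop_eq_all 0 le_rfl (a :: r) []
      simp only [solution, PySem.Set.empty] at *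
      rw [this, pad_eq]
      simp
    have hB : solution_alt (a :: r) 0 = [] := by
      rw [alt_eq _ _ le_rfl]; simp
    rw [hA, hB]
    exact dedupRel_ne_nil a r
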